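-- pv_equiv track=rewrite | github.com/meritechsolutions/azenqos_qgis_plugin | Azenqos/qgis_layers_gen.py | get_lon_lat_column_name
-- ===== SOURCE A (Python) =====
-- def get_lon_lat_column_name(column_list):
--     column_list= [column.lower() for column in column_list]
--     x_field=None
--     y_field=None
--     if "long" in column_list and "lat" in column_list:
--         x_field="long"
--         y_field="lat"
--     elif "lon" in column_list and "lat" in column_list:
--         x_field="lon"
--         y_field="lat"
--     elif "positioning_long" in column_list and "positioning_lat" in column_list:
--         x_field="positioning_long"
--         y_field="positioning_lat"
--     elif "positioning_lon" in column_list and "positioning_lat" in column_list: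
--         x_field="positioning_lon"
--         y_field="positioning_lat"
--     elif "longitude" in column_list and "latitude" in column_list:
--         x_field="longitude"
--         y_field="latitude"
--     elif "x" in column_list and "y" in column_list:
--         x_field="x"
--         y_field="y"
--     return x_field, y_field
-- ===== SOURCE B (Python) =====
-- # Single pass: OR together bit codes of recognised names, then decode the mask
-- # against a priority table of required bit patterns.
-- _NAMES = {
--     "long": 1, "lat": 2, "lon": 4,
--     "positioning_long": 8, "positioning_lat": 16, "positioning_lon": 32,
--     "longitude": 64, "latitude": 128, "x": 256, "y": 512,
-- }
--
-- _PAIRS = [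
--     (3, ("long", "lat")),
--     (6, ("lon", "lat")),
--     (24, ("positioning_long", "positioning_lat")),
--     (48, ("positioning_lon", "positioning_lat")),
--     (192, ("longitude", "latitude")),
--     (768, ("x", "y")),
-- ]
--
-- def get_lon_lat_column_name(column_list):
--     mask = 0
--     for column in column_list:
--         mask |= _NAMES.get(column.lower(), 0)
--     for need, pair in _PAIRS:
--         if mask & need == need:
--             return pair
--     return None, None
-- ===== Notes on version B (the rewrite author's own statement) =====
-- stated objective: alternative
-- what changed: Replaces six repeated if/elif membership scans with a single pass that ORs per-name bit codes into an integer mask, then decodes the mask against a priority table of required bit patterns.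
import Mathlib
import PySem

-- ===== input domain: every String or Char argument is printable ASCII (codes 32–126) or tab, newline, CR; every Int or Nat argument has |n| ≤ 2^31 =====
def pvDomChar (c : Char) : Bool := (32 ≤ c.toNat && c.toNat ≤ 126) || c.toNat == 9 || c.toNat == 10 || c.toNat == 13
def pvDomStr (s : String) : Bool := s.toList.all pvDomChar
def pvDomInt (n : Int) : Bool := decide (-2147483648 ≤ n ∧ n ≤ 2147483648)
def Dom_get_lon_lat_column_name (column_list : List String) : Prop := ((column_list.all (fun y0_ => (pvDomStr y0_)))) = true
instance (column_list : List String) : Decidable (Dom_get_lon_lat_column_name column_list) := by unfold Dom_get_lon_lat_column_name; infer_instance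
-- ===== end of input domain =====

-- B replaces A's six repeated if/elif membership scans with a single pass that ORs
-- per-name bit codes into an integer mask, then decodes the mask against a priority
-- table of required bit patterns (objective: alternative).

-- ===== PORT A =====
def get_lon_lat_column_name (column_list : List String) : Option String × Option String :=
  let cl := column_list.map PySem.Str.lower
  if cl.contains "long" && cl.contains "lat" then (some "long", some "lat")
  else if cl.contains "lon" && cl.contains "lat" then (some "lon", some "lat")
  else if cl.contains "positioning_long" && cl.contains "positioning_lat" then (some "positioning_long", some "positioning_lat")
  else if cl.contains "positioning_lon" && cl.contains "positioning_lat" then (some "positioning_lon", some "positioning_lat")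
  else if cl.contains "longitude" && cl.contains "latitude" then (some "longitude", some "latitude")
  else if cl.contains "x" && cl.contains "y" then (some "x", some "y")
  else (none, none)

-- ===== PORT B =====
-- the _NAMES dict literal (distinct keys, insertion order)
def pvNames : PySem.Dict String Nat :=
  PySem.Dict.mk
    [("long", 1), ("lat", 2), ("lon", 4),
     ("positioning_long", 8), ("positioning_lat", 16), ("positioning_lon", 32),
     ("longitude", 64), ("latitude", 128), ("x", 256), ("y", 512)]

def pvPairs : List (Nat × (String × String)) :=
  [(3, ("long", "lat")), (6, ("lon", "lat")),
   (24, ("positioning_long", "positioning_lat")),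
   (48, ("positioning_lon", "positioning_lat")),
   (192, ("longitude", "latitude")), (768, ("x", "y"))]

def get_lon_lat_column_name_alt (column_list : List String) : Option String × Option String :=
  let mask : Nat := column_list.foldl (fun m column => m ||| PySem.Dict.getD pvNames (PySem.Str.lower column) 0) 0
  match pvPairs.find? (fun p => mask &&& p.1 == p.1) with
  | some (_, (x, y)) => (some x, some y)
  | none => (none, none)

-- ===== PRECONDITION & SPEC =====
def Spec_get_lon_lat_column_name (column_list : List String) (out : Option String × Option String) : Prop := out = get_lon_lat_column_name_alt column_list
instance (column_list : List String) (out : Option String × Option String) : Decidable (Spec_get_lon_lat_column_name column_list out) := by unfold Spec_get_lon_lat_column_name; infer_instance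

-- ===== CLAIM (what is proved, stated in full; the proofs are below) =====
def Claim_equal_get_lon_lat_column_name : Prop := ∀ (column_list : List String), Dom_get_lon_lat_column_name column_list → Spec_get_lon_lat_column_name column_list (get_lon_lat_column_name column_list)

-- ===== LEMMAS AND PROOFS =====

-- the dict lookup written out as a case split on the key
theorem pv_code (s : String) : PySem.Dict.getD pvNames s 0 =
    if "long" == s then 1 else if "lat" == s then 2 else if "lon" == s then 4
    else if "positioning_long" == s then 8 else if "positioning_lat" == s then 16
    else if "positioning_lon" == s then 32 else if "longitude" == s then 64
    else if "latitude" == s then 128 else if "x" == s then 256 else if "y" == s then 512 else 0 := by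
  have hnil : (PySem.Dict.mk ([] : List (String × Nat))).get? s = none := rfl
  simp only [pvNames, PySem.Dict.getD, PySem.Dict.get?_mk_cons,
    apply_ite (fun o : Option Nat => o.getD 0), Option.getD_some, Option.getD_none, hnil]

-- each bit of a code identifies one name
theorem pv_code_bit (s : String) :
    ((PySem.Dict.getD pvNames s 0).testBit 0 = decide (s = "long")) ∧
    ((PySem.Dict.getD pvNames s 0).testBit 1 = decide (s = "lat")) ∧
    ((PySem.Dict.getD pvNames s 0).testBit 2 = decide (s = "lon")) ∧
    ((PySem.Dict.getD pvNames s 0).testBit 3 = decide (s = "positioning_long")) ∧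
    ((PySem.Dict.getD pvNames s 0).testBit 4 = decide (s = "positioning_lat")) ∧
    ((PySem.Dict.getD pvNames s 0).testBit 5 = decide (s = "positioning_lon")) ∧
    ((PySem.Dict.getD pvNames s 0).testBit 6 = decide (s = "longitude")) ∧
    ((PySem.Dict.getD pvNames s 0).testBit 7 = decide (s = "latitude")) ∧
    ((PySem.Dict.getD pvNames s 0).testBit 8 = decide (s = "x")) ∧
    ((PySem.Dict.getD pvNames s 0).testBit 9 = decide (s = "y")) := by
  rw [pv_code]
  split_ifs <;> try (rename_i h; (first | subst h | (replace h := eq_of_beq h; subst h)); decide)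
  simp only [Nat.zero_testBit]
  refine ⟨?_,?_,?_,?_,?_,?_,?_,?_,?_,?_⟩ <;>
    { symm; simp only [decide_eq_false_iff_not]; intro hh; subst hh; simp_all }

-- a bit of the folded mask is set iff some column ORed it in
theorem pv_testBit_foldl (cl : List String) (a : Nat) (k : Nat) :
    (cl.foldl (fun m c => m ||| PySem.Dict.getD pvNames (PySem.Str.lower c) 0) a).testBit k
      = (a.testBit k || cl.any (fun c => (PySem.Dict.getD pvNames (PySem.Str.lower c) 0).testBit k)) := by
  induction cl generalizing a with
  | nil => simp
  | cons h t ih => simp [List.foldl_cons, ih, Nat.testBit_or, Bool.or_assoc]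

theorem pv_bit (cl : List String) (k : Nat) (n : String)
    (hcode : ∀ s, (PySem.Dict.getD pvNames s 0).testBit k = decide (s = n)) :
    (cl.foldl (fun m c => m ||| PySem.Dict.getD pvNames (PySem.Str.lower c) 0) 0).testBit k
      = (cl.map PySem.Str.lower).contains n := by
  rw [pv_testBit_foldl, List.contains_eq_any_beq, List.any_map]
  simp only [Nat.zero_testBit, Bool.false_or]
  apply PySem.List.any_congr_mem
  intro c _
  rw [hcode, Bool.eq_iff_iff]
  simp only [decide_eq_true_eq, Function.comp_apply, beq_iff_eq]
  exact eq_comm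

-- mask & (2^i | 2^j) == 2^i | 2^j tests exactly bits i and j
theorem pv_and_two_pow (m i j : Nat) (hij : i ≠ j) :
    (m &&& (2^i ||| 2^j) == (2^i ||| 2^j)) = (m.testBit i && m.testBit j) := by
  rw [Bool.eq_iff_iff, beq_iff_eq]
  constructor
  · intro h'
    have hi := congrArg (fun x => x.testBit i) h'
    have hj := congrArg (fun x => x.testBit j) h'
    simp [Nat.testBit_and, Nat.testBit_or, hij, hij.symm] at hi hj
    simp [hi, hj]
  · intro h
    apply Nat.eq_of_testBit_eq
    intro b
    simp only [Nat.testBit_and, Nat.testBit_or, Nat.testBit_two_pow]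
    by_cases hbi : i = b
    · subst hbi; simp_all
    · by_cases hbj : j = b
      · subst hbj; simp_all
      · simp [hbi, hbj]

-- ===== VERDICT (by name: the statement is the Claim_ definition above) =====
theorem get_lon_lat_column_name_spec : Claim_equal_get_lon_lat_column_name := by
  intro cl _
  unfold Spec_get_lon_lat_column_name get_lon_lat_column_name get_lon_lat_column_name_alt pvPairs
  have hc := pv_code_bit
  have b0 := pv_bit cl 0 "long" (fun s => (hc s).1)
  have b1 := pv_bit cl 1 "lat" (fun s => (hc s).2.1)
  have b2 := pv_bit cl 2 "lon" (fun s => (hc s).2.2.1)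
  have b3 := pv_bit cl 3 "positioning_long" (fun s => (hc s).2.2.2.1)
  have b4 := pv_bit cl 4 "positioning_lat" (fun s => (hc s).2.2.2.2.1)
  have b5 := pv_bit cl 5 "positioning_lon" (fun s => (hc s).2.2.2.2.2.1)
  have b6 := pv_bit cl 6 "longitude" (fun s => (hc s).2.2.2.2.2.2.1)
  have b7 := pv_bit cl 7 "latitude" (fun s => (hc s).2.2.2.2.2.2.2.1)
  have b8 := pv_bit cl 8 "x" (fun s => (hc s).2.2.2.2.2.2.2.2.1)
  have b9 := pv_bit cl 9 "y" (fun s => (hc s).2.2.2.2.2.2.2.2.2)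
  set mask := cl.foldl (fun m c => m ||| PySem.Dict.getD pvNames (PySem.Str.lower c) 0) 0 with hmask
  have e1 := pv_and_two_pow mask 0 1 (by omega)
  have e2 := pv_and_two_pow mask 2 1 (by omega)
  have e3 := pv_and_two_pow mask 3 4 (by omega)
  have e4 := pv_and_two_pow mask 5 4 (by omega)
  have e5 := pv_and_two_pow mask 6 7 (by omega)
  have e6 := pv_and_two_pow mask 8 9 (by omega)
  rw [show ((2:Nat)^0 ||| 2^1) = 3 from by decide] at e1
  rw [show ((2:Nat)^2 ||| 2^1) = 6 from by decide] at e2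
  rw [show ((2:Nat)^3 ||| 2^4) = 24 from by decide] at e3
  rw [show ((2:Nat)^5 ||| 2^4) = 48 from by decide] at e4
  rw [show ((2:Nat)^6 ||| 2^7) = 192 from by decide] at e5
  rw [show ((2:Nat)^8 ||| 2^9) = 768 from by decide] at e6
  rw [b0, b1] at e1
  rw [b2, b1] at e2
  rw [b3, b4] at e3
  rw [b5, b4] at e4
  rw [b6, b7] at e5
  rw [b8, b9] at e6
  simp only [List.find?, e1, e2, e3, e4, e5, e6]
  split_ifs <;> simp only [*]
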